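-- pv_equiv track=rewrite | github.com/MrBrantCode/unitest_baseline | mut_generate/mist_train_taco/taco_8594/solution.py | max_xor_xnor
-- ===== SOURCE A (Python) =====
-- def max_xor_xnor(a, b, n):
--     def xnor(a, b):
--         if a < b:
--             a, b = b, a
--         if a == 0 and b == 0:
--             return 1
--         a_rem = 0
--         b_rem = 0
--         count = 0
--         xnornum = 0
--         while a != 0:
--             a_rem = a & 1
--             b_rem = b & 1
--             if a_rem == b_rem:
--                 xnornum |= 1 << count
--             count += 1
--             a = a >> 1
--             b = b >> 1
--         return xnornum
--
--     c = a ^ b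
--     d = xnor(a, b)
--     p = [a, b, c]
--     r = [a, b, d]
--     k = n % 3 - 1
--
--     return max(p[k], r[k])
-- ===== SOURCE B (Python) =====
-- def max_xor_xnor(a, b, n):
--     m = n % 3
--     if m == 1:
--         return a
--     if m == 2:
--         return b
--     x = a ^ b
--     if a == 0 and b == 0:
--         return max(x, 1)
--     hi = a if a >= b else b
--     xnor = ~x & ((1 << hi.bit_length()) - 1)
--     return max(x, xnor)
-- ===== Notes on version B (the rewrite author's own statement) =====
-- stated objective: simpler
-- what changed: A's bit-by-bit while-loop computing the xnor is replaced by the closed form ~(a^b) masked to max(a,b).bit_length() bits, and A's building of two 3-element lists indexed by n%3-1 (with Python negative indexing) is replaced by a direct three-way branch on n%3 returning a, b, or max(a^b, xnor).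
import Mathlib
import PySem

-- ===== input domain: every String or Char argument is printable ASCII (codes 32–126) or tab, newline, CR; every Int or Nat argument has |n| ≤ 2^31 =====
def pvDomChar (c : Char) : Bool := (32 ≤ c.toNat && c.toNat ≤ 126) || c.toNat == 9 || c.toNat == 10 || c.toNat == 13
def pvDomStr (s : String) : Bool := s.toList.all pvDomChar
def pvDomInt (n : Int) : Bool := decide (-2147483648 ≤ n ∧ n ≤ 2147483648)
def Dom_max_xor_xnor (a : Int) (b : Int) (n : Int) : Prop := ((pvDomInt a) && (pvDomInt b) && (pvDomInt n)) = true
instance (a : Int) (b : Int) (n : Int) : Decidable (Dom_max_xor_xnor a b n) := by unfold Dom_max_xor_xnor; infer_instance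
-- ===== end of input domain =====

-- B replaces A's bit-by-bit xnor loop by a masked bitwise closed form and A's
-- list-building/negative-indexing selection by a direct three-way branch on n % 3.

-- ===== PORT A =====
-- the `while a != 0` loop of the inner `xnor`; the fuel only makes the recursion
-- total — inside Pre_ (max(a,b) ≥ 0) and Dom (|a| ≤ 2^31) the loop runs at most
-- 32 times, so fuel 64 is never exhausted there
def pyXnorLoop : Nat → Int → Int → Nat → Int → Int
  | 0, _, _, _, xnornum => xnornum
  | fuel+1, a, b, count, xnornum =>
    if a = 0 then xnornum
    else
      let a_rem := PySem.Int.band a 1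
      let b_rem := PySem.Int.band b 1
      let xnornum' := if a_rem = b_rem then PySem.Int.bor xnornum ((1:Int) <<< count) else xnornum
      pyXnorLoop fuel (a >>> (1:Nat)) (b >>> (1:Nat)) (count+1) xnornum'

def pyXnor (a b : Int) : Int :=
  let p := if a < b then (b, a) else (a, b)
  if p.1 = 0 ∧ p.2 = 0 then 1
  else pyXnorLoop 64 p.1 p.2 0 0

def max_xor_xnor (a : Int) (b : Int) (n : Int) : Int :=
  let c := PySem.Int.bxor a b
  let d := pyXnor a b
  let p := [a, b, c]
  let r := [a, b, d]
  let k := PySem.Int.mod n 3 - 1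
  -- k ∈ {-1, 0, 1}, so Python's p[k] / r[k] never raises; the default is never used
  max (PySem.List.pyGetD p k 0) (PySem.List.pyGetD r k 0)

-- ===== PORT B =====
def max_xor_xnor_alt (a : Int) (b : Int) (n : Int) : Int :=
  let m := PySem.Int.mod n 3
  if m = 1 then a
  else if m = 2 then b
  else
    let x := PySem.Int.bxor a b
    if a = 0 ∧ b = 0 then max x 1
    else
      let hi := if a ≥ b then a else b
      let xnor := PySem.Int.band (Int.not x) (((1:Int) <<< (PySem.Int.bitLength hi)) - 1)
      max x xnor

-- ===== PRECONDITION & SPEC =====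
-- Pre_ excludes a < 0 ∧ b < 0: there A's `while a != 0` loop never terminates
-- (an arithmetic right shift of a negative number never reaches 0), so A
-- returns on exactly the inputs admitted here.
def Pre_max_xor_xnor (a : Int) (b : Int) (n : Int) : Prop := 0 ≤ a ∨ 0 ≤ b
instance (a : Int) (b : Int) (n : Int) : Decidable (Pre_max_xor_xnor a b n) := by unfold Pre_max_xor_xnor; infer_instance
def pvWitness_max_xor_xnor : Int × Int × Int := (5, 3, 7)

def Spec_max_xor_xnor (a : Int) (b : Int) (n : Int) (out : Int) : Prop := out = max_xor_xnor_alt a b n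
instance (a : Int) (b : Int) (n : Int) (out : Int) : Decidable (Spec_max_xor_xnor a b n out) := by unfold Spec_max_xor_xnor; infer_instance

-- ===== CLAIM (what is proved, stated in full; the proofs are below) =====
def Claim_equal_max_xor_xnor : Prop := ∀ (a : Int) (b : Int) (n : Int), Dom_max_xor_xnor a b n → Pre_max_xor_xnor a b n → Spec_max_xor_xnor a b n (max_xor_xnor a b n)

-- ===== LEMMAS AND PROOFS =====

-- the mathematical value both the loop and the closed form compute:
-- the low `L` xnor-bits of `a` and `b`
def xnorSpec : Nat → Int → Int → Int
  | 0, _, _ => 0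
  | L+1, a, b => (if a.bodd = b.bodd then 1 else 0) + 2 * xnorSpec L a.div2 b.div2

theorem xnorSpec_succ (L : Nat) (a b : Int) :
    xnorSpec (L+1) a b = (if a.bodd = b.bodd then 1 else 0) + 2 * xnorSpec L a.div2 b.div2 := rfl

theorem xnorSpec_comm (L : Nat) : ∀ a b : Int, xnorSpec L a b = xnorSpec L b a := by
  induction L with
  | zero => intro a b; rfl
  | succ L ih =>
    intro a b
    rw [xnorSpec_succ, xnorSpec_succ, ih]
    cases ha : a.bodd <;> cases hb : b.bodd <;> simp

-- ---- small bridges between PySem / core / Mathlib bit operations ----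

theorem pv_not_eq_lnot (a : Int) : Int.not a = Int.lnot a := by cases a <;> rfl

theorem pv_bxor_eq_xor (a b : Int) : PySem.Int.bxor a b = Int.xor a b := by
  cases a <;> cases b <;>
    simp [PySem.Int.bxor, Int.xor, Int.negSucc_eq] <;> omega

theorem pv_nat_and_add_ldiff (m n : Nat) : (m &&& n) + Nat.ldiff m n = m := by
  induction m using Nat.binaryRec generalizing n with
  | zero => simp [Nat.ldiff]
  | bit b m ih =>
    rw [← Nat.bit_bodd_div2 n, Nat.land_bit, Nat.ldiff_bit]
    have := ih n.div2
    cases b <;> cases n.bodd <;> simp [Nat.bit_val] <;> omega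

theorem pv_band_eq_land (a b : Int) : PySem.Int.band a b = Int.land a b := by
  have hsub : ∀ m n : Nat, m - (m &&& n) = Nat.ldiff m n := by
    intro m n; have h := pv_nat_and_add_ldiff m n; omega
  cases a with
  | ofNat m =>
    cases b with
    | ofNat n => simp [PySem.Int.band, Int.land]
    | negSucc n =>
      simp [PySem.Int.band, Int.land, Int.negSucc_eq, show ¬((n:Int) ≤ -1) by omega]
      exact hsub m n
  | negSucc m =>
    cases b with
    | ofNat n =>
      simp [PySem.Int.band, Int.land, Int.negSucc_eq, show ¬((m:Int) ≤ -1) by omega]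
      exact hsub n m
    | negSucc n =>
      simp [PySem.Int.band, Int.land, Int.negSucc_eq,
        show ¬((m:Int) ≤ -1) by omega, show ¬((n:Int) ≤ -1) by omega]
      omega

theorem pv_shiftRight_one (a : Int) : a >>> (1:Nat) = a.div2 := by
  cases a <;> simp [Int.div2, Nat.div2_val] <;> rfl

theorem pv_one_shiftLeft (c : Nat) : (1:Int) <<< c = 2^c := by
  simp [Int.shiftLeft_eq]

theorem pv_fdiv_two_eq_div2 (a : Int) : Int.fdiv a 2 = a.div2 := by
  cases a with
  | ofNat m =>
    cases m with
    | zero => rfl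
    | succ k =>
      show ((k:Int) + 1) / 2 = _
      have h := Nat.bodd_add_div2 k
      simp [Int.div2, Nat.div2_val]
      cases hb : Nat.bodd k <;> simp [hb] at h ⊢ <;> omega
  | negSucc m => simp [Int.fdiv, Int.div2, Nat.div2_val]

theorem pv_band_one_eq (a : Int) : PySem.Int.band a 1 = if a.bodd then 1 else 0 := by
  rw [PySem.Int.band_one, show PySem.Int.mod a 2 = a % 2 from PySem.Int.mod_eq_emod_of_pos (by norm_num)]
  have h := Int.bodd_add_div2 a
  cases hb : a.bodd <;> simp [hb] at h ⊢ <;> omega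

theorem pv_nat_or_two_pow (c : Nat) : ∀ m : Nat, m < 2^c → m ||| 2^c = m + 2^c := by
  induction c with
  | zero => intro m h; interval_cases m; rfl
  | succ c ih =>
    intro m h
    rw [← Nat.bit_bodd_div2 m, show 2^(c+1) = Nat.bit false (2^c) by simp [Nat.bit_val]; ring]
    rw [Nat.lor_bit]
    have hdc := Nat.bodd_add_div2 m
    have hm : m.div2 < 2^c := by cases hb : m.bodd <;> rw [hb] at hdc <;> simp at hdc <;> omega
    rw [ih m.div2 hm]
    cases hb : m.bodd <;> rw [hb] at hdc <;> simp [Nat.bit_val] at hdc ⊢ <;> omega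

theorem pv_bor_two_pow (c : Nat) (x : Int) (h0 : 0 ≤ x) (h1 : x < 2^c) :
    PySem.Int.bor x (2^c) = x + 2^c := by
  have hc : ((2^c : Nat) : Int) = 2^c := by push_cast; ring
  rw [PySem.Int.bor_of_nonneg h0 (by positivity)]
  rw [show ((2:Int)^c).toNat = 2^c from by omega]
  rw [pv_nat_or_two_pow c x.toNat (by omega)]
  push_cast; omega

-- ---- the A-side loop computes xnorSpec ----

theorem pv_bitLength_div2 (a : Int) (h : 0 < a) :
    PySem.Int.bitLength a = PySem.Int.bitLength a.div2 + 1 := by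
  rw [PySem.Int.bitLength_of_pos h]
  simp [PySem.Int.floordiv, pv_fdiv_two_eq_div2]

theorem pv_loop_eq (fuel : Nat) : ∀ (a b : Int) (count : Nat) (acc : Int),
    0 ≤ a → PySem.Int.bitLength a ≤ fuel → 0 ≤ acc → acc < 2^count →
    pyXnorLoop fuel a b count acc = acc + xnorSpec (PySem.Int.bitLength a) a b * 2^count := by
  induction fuel with
  | zero =>
    intro a b count acc _ hbl _ _
    have h0 : PySem.Int.bitLength a = 0 := by omega
    simp [pyXnorLoop, h0, xnorSpec]
  | succ fuel ih =>
    intro a b count acc ha hbl hacc0 hacc1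
    by_cases hz : a = 0
    · simp [pyXnorLoop, hz, PySem.Int.bitLength_zero, xnorSpec]
    · have hpos : 0 < a := by omega
      have hL := pv_bitLength_div2 a hpos
      have hstep : pyXnorLoop (fuel+1) a b count acc =
          pyXnorLoop fuel (a >>> (1:Nat)) (b >>> (1:Nat)) (count+1)
            (if PySem.Int.band a 1 = PySem.Int.band b 1 then PySem.Int.bor acc ((1:Int) <<< count) else acc) := by
        simp [pyXnorLoop, hz]
      rw [hstep, pv_shiftRight_one, pv_shiftRight_one]
      have hdiv2 : 0 ≤ a.div2 := by
        rw [← pv_fdiv_two_eq_div2]; exact Int.fdiv_nonneg ha (by norm_num)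
      have hbld : PySem.Int.bitLength a.div2 ≤ fuel := by omega
      by_cases hcond : PySem.Int.band a 1 = PySem.Int.band b 1
      · rw [if_pos hcond, pv_one_shiftLeft, pv_bor_two_pow count acc hacc0 hacc1]
        rw [ih a.div2 b.div2 (count+1) (acc + 2^count) hdiv2 hbld (by positivity) (by rw [pow_succ]; omega)]
        rw [hL]
        have hbodd : a.bodd = b.bodd := by
          rw [pv_band_one_eq, pv_band_one_eq] at hcond
          cases hba : a.bodd <;> cases hbb : b.bodd <;> simp [hba, hbb] at hcond ⊢
        rw [xnorSpec_succ]
        simp [hbodd]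
        ring
      · rw [if_neg hcond]
        rw [ih a.div2 b.div2 (count+1) acc hdiv2 hbld hacc0 (by rw [pow_succ]; omega)]
        rw [hL]
        have hbodd : ¬ (a.bodd = b.bodd) := by
          rw [pv_band_one_eq, pv_band_one_eq] at hcond
          cases hba : a.bodd <;> cases hbb : b.bodd <;> simp [hba, hbb] at hcond ⊢
        rw [xnorSpec_succ]
        simp [hbodd]
        ring

-- ---- the B-side closed form computes xnorSpec ----

theorem pv_mask_eq (L : Nat) : (2:Int)^(L+1) - 1 = Int.bit true (2^L - 1) := by
  simp [Int.bit_val]; ring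

theorem pv_spec_eq (L : Nat) : ∀ (a b : Int),
    Int.land (Int.lnot (Int.xor a b)) (2^L - 1) = xnorSpec L a b := by
  induction L with
  | zero =>
    intro a b
    show Int.land _ 0 = _
    rcases (Int.lnot (Int.xor a b)) with m | m <;> simp [Int.land, xnorSpec, Nat.ldiff]
  | succ L ih =>
    intro a b
    conv_lhs => rw [← Int.bit_decomp a, ← Int.bit_decomp b]
    rw [Int.lxor_bit, Int.lnot_bit, pv_mask_eq, Int.land_bit, ih]
    rw [show xnorSpec (L+1) a b = _ from xnorSpec_succ L a b]
    cases ha : a.bodd <;> cases hb : b.bodd <;> simp [Int.bit_val] <;> ring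

-- ---- assembly ----

theorem pv_bitLength_le (a : Int) (h : a.natAbs ≤ 2^31) : PySem.Int.bitLength a ≤ 64 := by
  by_cases hz : a = 0
  · rw [hz, PySem.Int.bitLength_zero]; omega
  · have h1 := PySem.Int.two_pow_bitLength_le a hz
    have h2 : 2^(PySem.Int.bitLength a - 1) ≤ 2^31 := le_trans h1 h
    have h3 : PySem.Int.bitLength a - 1 ≤ 31 := (Nat.pow_le_pow_iff_right (by omega)).mp h2
    omega

theorem pv_xnor_closed (a b : Int) (hpre : 0 ≤ a ∨ 0 ≤ b)
    (hA : a.natAbs ≤ 2^31) (hB : b.natAbs ≤ 2^31) (hz : ¬(a = 0 ∧ b = 0)) :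
    pyXnor a b =
      PySem.Int.band (Int.not (PySem.Int.bxor a b))
        (((1:Int) <<< (PySem.Int.bitLength (if a ≥ b then a else b))) - 1) := by
  have hrhs : ∀ hi : Int,
      PySem.Int.band (Int.not (PySem.Int.bxor a b)) (((1:Int) <<< (PySem.Int.bitLength hi)) - 1)
        = xnorSpec (PySem.Int.bitLength hi) a b := by
    intro hi
    rw [pv_band_eq_land, pv_not_eq_lnot, pv_bxor_eq_xor, pv_one_shiftLeft, pv_spec_eq]
  by_cases hlt : a < b
  · have hb0 : 0 ≤ b := by omega
    have hhi : (if a ≥ b then a else b) = b := by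
      rw [if_neg (by omega)]
    rw [hhi, hrhs b]
    unfold pyXnor
    rw [if_pos hlt]
    simp only []
    rw [if_neg (by omega)]
    rw [pv_loop_eq 64 b a 0 0 hb0 (pv_bitLength_le b hB) (by norm_num) (by norm_num)]
    rw [xnorSpec_comm]
    ring
  · have ha0 : 0 ≤ a := by rcases hpre with h | h; exact h; omega
    have hhi : (if a ≥ b then a else b) = a := by
      rw [if_pos (by omega)]
    rw [hhi, hrhs a]
    unfold pyXnor
    rw [if_neg hlt]
    simp only []
    rw [if_neg (by omega)]
    rw [pv_loop_eq 64 a b 0 0 ha0 (pv_bitLength_le a hA) (by norm_num) (by norm_num)]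
    ring

-- ===== VERDICT (by name: the statement is the Claim_ definition above) =====
theorem max_xor_xnor_spec : Claim_equal_max_xor_xnor := by
  intro a b n hdom hpre
  unfold Spec_max_xor_xnor
  have hdom' : a.natAbs ≤ 2^31 ∧ b.natAbs ≤ 2^31 := by
    unfold Dom_max_xor_xnor pvDomInt at hdom
    simp at hdom
    constructor <;> omega
  have hmod : PySem.Int.mod n 3 = n % 3 := PySem.Int.mod_eq_emod_of_pos (by norm_num)
  have hm3 : n % 3 = 0 ∨ n % 3 = 1 ∨ n % 3 = 2 := by omega
  unfold max_xor_xnor max_xor_xnor_alt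
  simp only [hmod]
  rcases hm3 with h | h | h <;> rw [h]
  · -- k = -1: Python's p[-1], r[-1] pick the xor / xnor entries
    show max (PySem.List.pyGetD [a, b, PySem.Int.bxor a b] (0 - 1) 0)
             (PySem.List.pyGetD [a, b, pyXnor a b] (0 - 1) 0) = _
    rw [show PySem.List.pyGetD [a, b, PySem.Int.bxor a b] (0 - 1) 0 = PySem.Int.bxor a b from rfl]
    rw [show PySem.List.pyGetD [a, b, pyXnor a b] (0 - 1) 0 = pyXnor a b from rfl]
    rw [if_neg (by norm_num), if_neg (by norm_num)]
    by_cases hz : a = 0 ∧ b = 0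
    · obtain ⟨ha, hb⟩ := hz
      subst ha; subst hb
      simp
      decide
    · rw [if_neg hz]
      rw [pv_xnor_closed a b hpre hdom'.1 hdom'.2 hz]
  · -- k = 0: both lists give a
    show max (PySem.List.pyGetD [a, b, PySem.Int.bxor a b] (1 - 1) 0)
             (PySem.List.pyGetD [a, b, pyXnor a b] (1 - 1) 0) = _
    rw [show PySem.List.pyGetD [a, b, PySem.Int.bxor a b] (1 - 1) 0 = a from rfl]
    rw [show PySem.List.pyGetD [a, b, pyXnor a b] (1 - 1) 0 = a from rfl]
    rw [if_pos rfl]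
    exact max_self a
  · -- k = 1: both lists give b
    show max (PySem.List.pyGetD [a, b, PySem.Int.bxor a b] (2 - 1) 0)
             (PySem.List.pyGetD [a, b, pyXnor a b] (2 - 1) 0) = _
    rw [show PySem.List.pyGetD [a, b, PySem.Int.bxor a b] (2 - 1) 0 = b from rfl]
    rw [show PySem.List.pyGetD [a, b, pyXnor a b] (2 - 1) 0 = b from rfl]
    rw [if_neg (by norm_num), if_pos rfl]
    exact max_self b
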